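-- pv_equiv track=rewrite | github.com/hydroxycarbamide/Gradience | gradience/backend/utils/colors.py | hexFromArgb
-- ===== SOURCE A (Python) =====
-- def redFromArgb(argb):
--     return argb >> 16 & 255
--
-- def greenFromArgb(argb):
--     return argb >> 8 & 255
--
-- def blueFromArgb(argb):
--     return argb & 255
--
-- def hexFromArgb(argb):
--     r = redFromArgb(argb)
--     g = greenFromArgb(argb)
--     b = blueFromArgb(argb)
--     outParts = [f'{r:x}', f'{g:x}', f'{b:x}']
--     # Pad single-digit output values
--     for i, part in enumerate(outParts):
--         if (len(part) == 1):
--             outParts[i] = '0' + part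
--     return '#' + ''.join(outParts)
-- ===== SOURCE B (Python) =====
-- def hexFromArgb(argb):
--     return '#%06x' % (argb & 0xFFFFFF)
-- ===== Notes on version B (the rewrite author's own statement) =====
-- stated objective: simpler
-- what changed: Replaces the three-component extraction with per-part pad loop by masking the low three bytes once and emitting them with a single zero-padded %06x format.
import Mathlib
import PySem

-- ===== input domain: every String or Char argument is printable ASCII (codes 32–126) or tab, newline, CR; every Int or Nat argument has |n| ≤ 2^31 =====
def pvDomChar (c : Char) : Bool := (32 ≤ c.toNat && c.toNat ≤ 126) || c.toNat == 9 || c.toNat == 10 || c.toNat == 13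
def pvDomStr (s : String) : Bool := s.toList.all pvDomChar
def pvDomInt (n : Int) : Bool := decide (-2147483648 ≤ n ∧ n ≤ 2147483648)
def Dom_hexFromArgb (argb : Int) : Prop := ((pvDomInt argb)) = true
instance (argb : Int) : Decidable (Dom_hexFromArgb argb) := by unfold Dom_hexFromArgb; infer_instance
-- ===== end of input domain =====

-- B replaces A's three-component extraction and per-part pad loop by one mask of the low three bytes
-- formatted with a single zero-padded %06x expression (objective: simpler).


-- shared numeric-to-hex helpers (Python's f'{n:x}' / '%x' digit machinery)
def hexDigit (n : Nat) : Char := if n < 10 then Char.ofNat (48 + n) else Char.ofNat (87 + n)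

-- lowercase hex digits of a nonnegative number, most significant first (no padding)
def hexChars (n : Nat) : List Char :=
  if n < 16 then [hexDigit n]
  else hexChars (n / 16) ++ [hexDigit (n % 16)]
decreasing_by exact Nat.div_lt_self (by omega) (by omega)

-- f'{v:x}' for an Int (values here are always ≥ 0, but the format handles the sign)
def pyHexInt (v : Int) : List Char :=
  if v < 0 then '-' :: hexChars (-v).toNat else hexChars v.toNat

-- ===== PORT A =====
def redFromArgb (argb : Int) : Int := PySem.Int.band (argb >>> 16) 255
def greenFromArgb (argb : Int) : Int := PySem.Int.band (argb >>> 8) 255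
def blueFromArgb (argb : Int) : Int := PySem.Int.band argb 255

def hexFromArgb (argb : Int) : String :=
  let r := redFromArgb argb
  let g := greenFromArgb argb
  let b := blueFromArgb argb
  let outParts : List (List Char) := [pyHexInt r, pyHexInt g, pyHexInt b]
  -- Pad single-digit output values (the for-loop rewrites each 1-char part in place)
  let padded := outParts.map (fun part => if part.length = 1 then '0' :: part else part)
  String.ofList ('#' :: padded.flatten)

-- ===== PORT B =====
-- '%06x' % v : hex digits of v left-padded with '0' to width 6 (v ≥ 0 here)
def hex06 (v : Nat) : List Char :=
  List.replicate (6 - (hexChars v).length) '0' ++ hexChars v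

def hexFromArgb_alt (argb : Int) : String :=
  String.ofList ('#' :: hex06 (PySem.Int.band argb 16777215).toNat)

-- ===== PRECONDITION & SPEC =====
def Spec_hexFromArgb (argb : Int) (out : String) : Prop := out = hexFromArgb_alt argb
instance (argb : Int) (out : String) : Decidable (Spec_hexFromArgb argb out) := by unfold Spec_hexFromArgb; infer_instance

-- ===== CLAIM (what is proved, stated in full; the proofs are below) =====
def Claim_equal_hexFromArgb : Prop := ∀ (argb : Int), Dom_hexFromArgb argb → Spec_hexFromArgb argb (hexFromArgb argb)

-- ===== LEMMAS AND PROOFS =====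

-- fixed-width digit chain of the low k hex digits, most significant first
def digitsK : Nat → Nat → List Char
  | 0, _ => []
  | k + 1, m => digitsK k (m / 16) ++ [hexDigit (m % 16)]

theorem digitsK_zero (k : Nat) : digitsK k 0 = List.replicate k '0' := by
  induction k with
  | zero => rfl
  | succ k ih =>
    show digitsK k (0 / 16) ++ [hexDigit (0 % 16)] = _
    rw [Nat.zero_div, ih, show hexDigit (0 % 16) = '0' from by decide, ← List.replicate_succ']

-- padding the bare hex digits to width k gives exactly the k-digit chain
theorem pad_eq_digitsK (k : Nat) (m : Nat) (hm : m < 16 ^ k) (hk : 1 ≤ k) :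
    List.replicate (k - (hexChars m).length) '0' ++ hexChars m = digitsK k m := by
  induction k generalizing m with
  | zero => omega
  | succ k ih =>
    by_cases hsm : m < 16
    · rw [hexChars]; simp only [hsm, ite_true]
      show List.replicate (k + 1 - 1) '0' ++ [hexDigit m] = digitsK k (m / 16) ++ [hexDigit (m % 16)]
      rw [Nat.div_eq_of_lt hsm, Nat.mod_eq_of_lt hsm, digitsK_zero]
      simp
    · have hk1 : 1 ≤ k := by
        by_contra h
        have : k = 0 := by omega
        subst this; simp at hm; omega
      have hdiv : m / 16 < 16 ^ k :=
        Nat.div_lt_of_lt_mul (by rw [show (16:Nat) * 16 ^ k = 16 ^ (k+1) from by ring]; exact hm)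
      rw [hexChars]; simp only [hsm, ite_false]
      show _ = digitsK k (m / 16) ++ [hexDigit (m % 16)]
      rw [← List.append_assoc, ← ih (m / 16) hdiv hk1]
      have hl : (hexChars (m / 16) ++ [hexDigit (m % 16)]).length
          = (hexChars (m / 16)).length + 1 := by simp
      rw [hl, show k + 1 - ((hexChars (m / 16)).length + 1)
          = k - (hexChars (m / 16)).length from by omega]

-- A's single-part pad: for v < 256 it is exactly the two digits of v
theorem pad2_eq {v : Nat} (h : v < 256) :
    (if (hexChars v).length = 1 then '0' :: hexChars v else hexChars v)
      = [hexDigit (v / 16), hexDigit (v % 16)] := by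
  by_cases hs : v < 16
  · rw [hexChars]
    simp only [hs, ite_true, List.length_singleton]
    rw [Nat.div_eq_of_lt hs, Nat.mod_eq_of_lt hs]
    rfl
  · rw [hexChars]
    simp only [hs, ite_false]
    have hd16 : v / 16 < 16 := by omega
    rw [hexChars]
    simp [hd16]

theorem toNat_ofNat (k : Nat) : (Int.ofNat k).toNat = k := rfl

theorem and255 (x : Nat) : x &&& 255 = x % 256 := Nat.and_two_pow_sub_one_eq_mod x 8
theorem and24 (x : Nat) : x &&& 16777215 = x % 16777216 := Nat.and_two_pow_sub_one_eq_mod x 24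

-- the six digits agree: the three padded byte pairs are exactly %06x of m
theorem core (m : Nat) (h : m < 16777216) :
    [hexDigit (m / 65536 / 16), hexDigit (m / 65536 % 16),
     hexDigit (m / 256 % 256 / 16), hexDigit (m / 256 % 256 % 16),
     hexDigit (m % 256 / 16), hexDigit (m % 256 % 16)] = hex06 m := by
  unfold hex06
  rw [pad_eq_digitsK 6 m (by omega) (by omega),
      show digitsK 6 m = [hexDigit (m / 16 / 16 / 16 / 16 / 16 % 16),
        hexDigit (m / 16 / 16 / 16 / 16 % 16), hexDigit (m / 16 / 16 / 16 % 16),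
        hexDigit (m / 16 / 16 % 16), hexDigit (m / 16 % 16), hexDigit (m % 16)] from by
        simp [digitsK]]
  simp only [List.cons.injEq, and_true]
  exact ⟨congrArg hexDigit (by omega), congrArg hexDigit (by omega),
    congrArg hexDigit (by omega), congrArg hexDigit (by omega),
    congrArg hexDigit (by omega), congrArg hexDigit (by omega)⟩

-- PySem.Int.band on the constructors, second argument a nonnegative literal
theorem bandA (n M : Nat) : PySem.Int.band (Int.ofNat n) (Int.ofNat M) = Int.ofNat (n &&& M) := by
  simp [PySem.Int.band]

theorem bandNeg (n M : Nat) :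
    PySem.Int.band (Int.negSucc n) (Int.ofNat M) = Int.ofNat (M - (M &&& n)) := by
  simp [PySem.Int.band, Int.neg_negSucc]

theorem pyHexInt_ofNat (v : Nat) : pyHexInt (Int.ofNat v) = hexChars v := by
  simp [pyHexInt]

-- the whole A-side string for byte values rv gv bv equals the B-side string for m
theorem bridge (rv gv bv mv : Nat) (hm : mv < 16777216)
    (e1 : rv = mv / 65536) (e2 : gv = mv / 256 % 256) (e3 : bv = mv % 256) :
    String.ofList ('#' :: ([hexChars rv, hexChars gv, hexChars bv].map
        (fun part => if part.length = 1 then '0' :: part else part)).flatten)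
      = String.ofList ('#' :: hex06 mv) := by
  have hr : rv < 256 := by omega
  have hg : gv < 256 := by omega
  have hb : bv < 256 := by omega
  simp only [List.map, List.flatten]
  rw [pad2_eq hr, pad2_eq hg, pad2_eq hb]
  subst e1 e2 e3
  rw [← core mv hm]
  simp

-- ===== VERDICT (by name: the statement is the Claim_ definition above) =====
theorem hexFromArgb_spec : Claim_equal_hexFromArgb := by
  intro argb _
  unfold Spec_hexFromArgb hexFromArgb hexFromArgb_alt redFromArgb greenFromArgb blueFromArgb
  cases argb with
  | ofNat n =>
    rw [show ((Int.ofNat n) >>> 16) = Int.ofNat (n >>> 16) from rfl,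
        show ((Int.ofNat n) >>> 8) = Int.ofNat (n >>> 8) from rfl,
        show (255 : Int) = Int.ofNat 255 from rfl,
        show (16777215 : Int) = Int.ofNat 16777215 from rfl,
        bandA, bandA, bandA, bandA, toNat_ofNat]
    simp only [pyHexInt_ofNat]
    exact bridge _ _ _ _
      (by rw [and24]; omega)
      (by rw [and255, and24, Nat.shiftRight_eq_div_pow]; omega)
      (by rw [and255, and24, Nat.shiftRight_eq_div_pow]; omega)
      (by rw [and255, and24]; omega)
  | negSucc n =>
    rw [show ((Int.negSucc n) >>> 16) = Int.negSucc (n >>> 16) from rfl,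
        show ((Int.negSucc n) >>> 8) = Int.negSucc (n >>> 8) from rfl,
        show (255 : Int) = Int.ofNat 255 from rfl,
        show (16777215 : Int) = Int.ofNat 16777215 from rfl,
        bandNeg, bandNeg, bandNeg, bandNeg, toNat_ofNat]
    simp only [pyHexInt_ofNat]
    exact bridge _ _ _ _
      (by rw [Nat.and_comm, and24]; omega)
      (by rw [Nat.and_comm 255, and255, Nat.and_comm, and24, Nat.shiftRight_eq_div_pow]; omega)
      (by rw [Nat.and_comm 255, and255, Nat.and_comm, and24, Nat.shiftRight_eq_div_pow]; omega)
      (by rw [Nat.and_comm 255, and255, Nat.and_comm, and24]; omega)
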